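-- pv_equiv track=rewrite | github.com/langtech-bsc/eloquence-interactive-playground | gradio_app/app_handlers.py | _find_prompt_entry
-- ===== SOURCE A (Python) =====
-- def _find_prompt_entry(prompts, selected_log: str):
--     if not selected_log:
--         return None
--     selected_log = selected_log.strip()
--     if selected_log.isdigit():
--         idx = int(selected_log)
--         if 0 <= idx < len(prompts):
--             return prompts[idx]
--         return None
--     for entry in reversed(prompts):
--         name = (entry.get("name") or "").strip()
--         if name == selected_log:
--             return entry
--     for entry in reversed(prompts):
--         name = (entry.get("name") or "").strip()
--         if not name:
--             continue
--         if name.startswith(selected_log) or selected_log.startswith(name):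
--             return entry
--     return None
-- ===== SOURCE B (Python) =====
-- def _find_prompt_entry(prompts, selected_log: str):
--     # One forward pass keeping the last exact match and the last prefix match.
--     if not selected_log:
--         return None
--     selected_log = selected_log.strip()
--     if selected_log.isdigit():
--         idx = int(selected_log)
--         return prompts[idx] if 0 <= idx < len(prompts) else None
--     exact = None
--     prefix = None
--     for entry in prompts:
--         name = (entry.get("name") or "").strip()
--         if name == selected_log:
--             exact = entry
--         if name and (name.startswith(selected_log) or selected_log.startswith(name)):
--             prefix = entry
--     return exact if exact is not None else prefix
-- ===== Notes on version B (the rewrite author's own statement) =====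
-- stated objective: alternative
-- what changed: Replaced A's two separate reversed() scans (exact then prefix) by a single forward pass that overwrites an exact-candidate and a prefix-candidate so the last match wins.
import Mathlib
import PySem

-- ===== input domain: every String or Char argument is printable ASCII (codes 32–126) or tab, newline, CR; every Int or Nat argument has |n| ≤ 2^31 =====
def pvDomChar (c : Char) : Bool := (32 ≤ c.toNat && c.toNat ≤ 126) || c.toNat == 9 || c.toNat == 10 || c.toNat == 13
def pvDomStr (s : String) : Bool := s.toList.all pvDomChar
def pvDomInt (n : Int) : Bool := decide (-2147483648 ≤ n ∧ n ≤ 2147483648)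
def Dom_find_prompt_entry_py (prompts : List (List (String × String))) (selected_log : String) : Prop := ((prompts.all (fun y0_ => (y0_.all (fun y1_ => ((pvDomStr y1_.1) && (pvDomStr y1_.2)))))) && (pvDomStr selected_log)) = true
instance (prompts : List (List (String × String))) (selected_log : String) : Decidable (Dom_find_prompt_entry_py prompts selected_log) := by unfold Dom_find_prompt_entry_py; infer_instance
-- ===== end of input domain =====

-- B replaces A's two reversed scans by one forward pass maintaining two candidates (alternative decomposition, same cost).

-- shared helper: (entry.get("name") or "").strip()  (assoc-list lookup = first match)
def pvEntryName (e : List (String × String)) : String :=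
  PySem.Str.strip ((e.lookup "name").getD "")

-- exact-match test of the first loop
def pvExactP (s : String) (e : List (String × String)) : Bool :=
  pvEntryName e == s

-- prefix-match test of the second loop
def pvPrefixP (s : String) (e : List (String × String)) : Bool :=
  let n := pvEntryName e
  !(n == "") && (PySem.Str.startswith n s || PySem.Str.startswith s n)

-- ===== PORT A =====
def find_prompt_entry_py (prompts : List (List (String × String))) (selected_log : String) : Option (List (String × String)) :=
  if selected_log = "" then none
  else
    let s := PySem.Str.strip selected_log
    if PySem.Str.strIsdigit s then
      match PySem.Int.ofStr? s with
      | none => none  -- unreachable: s.isdigit() guarantees int(s) succeeds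
      | some idx => if 0 ≤ idx ∧ idx < (prompts.length : Int) then PySem.List.pyGet? prompts idx else none
    else
      match prompts.reverse.find? (pvExactP s) with
      | some entry => some entry
      | none =>
        match prompts.reverse.find? (pvPrefixP s) with
        | some entry => some entry
        | none => none

-- ===== PORT B =====
def find_prompt_entry_py_alt (prompts : List (List (String × String))) (selected_log : String) : Option (List (String × String)) :=
  if selected_log = "" then none
  else
    let s := PySem.Str.strip selected_log
    if PySem.Str.strIsdigit s then
      match PySem.Int.ofStr? s with
      | none => none  -- unreachable: s.isdigit() guarantees int(s) succeeds
      | some idx => if 0 ≤ idx ∧ idx < (prompts.length : Int) then PySem.List.pyGet? prompts idx else none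
    else
      let r := prompts.foldl
        (fun (acc : Option (List (String × String)) × Option (List (String × String))) entry =>
          (if pvExactP s entry then some entry else acc.1,
           if pvPrefixP s entry then some entry else acc.2))
        (none, none)
      match r.1 with
      | some e => some e
      | none => r.2

-- ===== PRECONDITION & SPEC =====
def Spec_find_prompt_entry_py (prompts : List (List (String × String))) (selected_log : String) (out : Option (List (String × String))) : Prop := out = find_prompt_entry_py_alt prompts selected_log
instance (prompts : List (List (String × String))) (selected_log : String) (out : Option (List (String × String))) : Decidable (Spec_find_prompt_entry_py prompts selected_log out) := by unfold Spec_find_prompt_entry_py; infer_instance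

-- ===== CLAIM (what is proved, stated in full; the proofs are below) =====
def Claim_equal_find_prompt_entry_py : Prop := ∀ (prompts : List (List (String × String))) (selected_log : String), Dom_find_prompt_entry_py prompts selected_log → Spec_find_prompt_entry_py prompts selected_log (find_prompt_entry_py prompts selected_log)

-- ===== LEMMAS AND PROOFS =====

-- the forward fold computes, in each component, the last matching entry (i.e. the first match of the reversed list)
theorem pv_fold_eq_find (s : String) (l : List (List (String × String)))
    (e p : Option (List (String × String))) :
    l.foldl
      (fun (acc : Option (List (String × String)) × Option (List (String × String))) entry =>
        (if pvExactP s entry then some entry else acc.1,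
         if pvPrefixP s entry then some entry else acc.2))
      (e, p)
    = ((l.reverse.find? (pvExactP s)).or e, (l.reverse.find? (pvPrefixP s)).or p) := by
  induction l generalizing e p with
  | nil => simp
  | cons x xs ih =>
    simp only [List.foldl_cons, List.reverse_cons, List.find?_append, ih]
    by_cases hx : pvExactP s x <;> by_cases hp : pvPrefixP s x <;>
      simp [hx, hp]

theorem find_prompt_entry_py_eq (prompts : List (List (String × String))) (selected_log : String) :
    find_prompt_entry_py prompts selected_log = find_prompt_entry_py_alt prompts selected_log := by
  unfold find_prompt_entry_py find_prompt_entry_py_alt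
  by_cases h0 : selected_log = ""
  · simp [h0]
  · by_cases hd : PySem.Chars.strIsdigit (PySem.Chars.strip selected_log.toList)
    · simp [h0, hd]
    · simp [h0, hd, pv_fold_eq_find]
      rcases h1 : prompts.reverse.find? (pvExactP (PySem.Str.strip selected_log)) with _ | e
      · rcases h2 : prompts.reverse.find? (pvPrefixP (PySem.Str.strip selected_log)) with _ | e <;> rfl
      · rfl

-- ===== VERDICT (by name: the statement is the Claim_ definition above) =====
theorem find_prompt_entry_py_spec : Claim_equal_find_prompt_entry_py := by
  intro prompts selected_log _
  exact find_prompt_entry_py_eq prompts selected_log
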